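-- pv_equiv track=rewrite | github.com/lvandeca/SchoolWork | CIS210/projects/p20_loops.py | add_digits2a_better
-- ===== SOURCE A (Python) =====
-- def add_digits2a_better(n):
--     '''(int) --> int
--
--     Return sum of digits of n, a positive 3-digit integer.
--     Implement using a while loop.
--
--     >>> add_digits2a_better(789)
--     24
--     >>> add_digits2a_better(101)
--     2
--     >>> add_digits2a_better(000)
--     0
--     '''
--     digit_sum = 0
--     ctr = 1
--     for ctr in range(3):
--         digit = n % 10
--         n = n // 10
--         digit_sum += digit
--         ctr += 1
--     return digit_sum
-- ===== SOURCE B (Python) =====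
-- def add_digits2a_better(n):
--     return n % 10 + (n // 10) % 10 + (n // 100) % 10
-- ===== Notes on version B (the rewrite author's own statement) =====
-- stated objective: simpler
-- what changed: Replaced the 3-iteration loop with mutable accumulator and repeated n//=10 by a single closed-form expression summing the three low-order digits directly.
import Mathlib
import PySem

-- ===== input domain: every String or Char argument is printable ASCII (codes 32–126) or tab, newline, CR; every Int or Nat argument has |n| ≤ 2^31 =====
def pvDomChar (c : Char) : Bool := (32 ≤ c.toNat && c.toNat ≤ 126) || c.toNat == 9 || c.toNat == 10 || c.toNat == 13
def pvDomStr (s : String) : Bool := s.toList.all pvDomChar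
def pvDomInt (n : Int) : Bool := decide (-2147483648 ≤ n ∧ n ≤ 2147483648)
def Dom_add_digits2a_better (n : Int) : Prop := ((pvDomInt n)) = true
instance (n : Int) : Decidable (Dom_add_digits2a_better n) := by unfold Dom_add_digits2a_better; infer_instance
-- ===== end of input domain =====

-- B replaces A's 3-iteration accumulator loop with one closed-form sum of the three low-order digits (simpler).


-- ===== PORT A =====
-- state: (digit_sum, n); ctr is dead in the Python loop body
def add_digits2a_better (n : Int) : Int :=
  let r := (PySem.List.pyRange 0 3 1).foldl
    (fun (st : Int × Int) _ =>
      let digit := PySem.Int.mod st.2 10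
      let n' := PySem.Int.floordiv st.2 10
      (st.1 + digit, n'))
    (0, n)
  r.1

-- ===== PORT B =====
def add_digits2a_better_alt (n : Int) : Int :=
  PySem.Int.mod n 10 + PySem.Int.mod (PySem.Int.floordiv n 10) 10
    + PySem.Int.mod (PySem.Int.floordiv n 100) 10

-- ===== PRECONDITION & SPEC =====
def Spec_add_digits2a_better (n : Int) (out : Int) : Prop := out = add_digits2a_better_alt n
instance (n : Int) (out : Int) : Decidable (Spec_add_digits2a_better n out) := by unfold Spec_add_digits2a_better; infer_instance

-- ===== CLAIM (what is proved, stated in full; the proofs are below) =====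
def Claim_equal_add_digits2a_better : Prop := ∀ (n : Int), Dom_add_digits2a_better n → Spec_add_digits2a_better n (add_digits2a_better n)

-- ===== LEMMAS AND PROOFS =====
theorem pv_floordiv_floordiv (n : Int) :
    PySem.Int.floordiv (PySem.Int.floordiv n 10) 10 = PySem.Int.floordiv n 100 := by
  rw [PySem.Int.floordiv_eq_ediv_of_pos (a := n) (by norm_num),
      PySem.Int.floordiv_eq_ediv_of_pos (by norm_num),
      PySem.Int.floordiv_eq_ediv_of_pos (by norm_num)]
  omega

-- ===== VERDICT (by name: the statement is the Claim_ definition above) =====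
theorem add_digits2a_better_spec : Claim_equal_add_digits2a_better := by
  intro n _
  show add_digits2a_better n = add_digits2a_better_alt n
  unfold add_digits2a_better add_digits2a_better_alt
  have h3 : PySem.List.pyRange 0 3 1 = [0, 1, 2] := by decide
  rw [h3]
  simp only [List.foldl]
  rw [pv_floordiv_floordiv]; ring
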